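-- pv_equiv track=rewrite | github.com/uzziel-lopez/Ficha-Tecnica-Salud | scripts/etl/conect_siais.py | recalcular_resumen_anual
-- ===== SOURCE A (Python) =====
-- def recalcular_resumen_anual(datos_historicos):
--     """Recalcula el resumen anual basado en todos los periodos"""
--     resumen = {
--         "Total de Consultas de la Unidad": 0,
--         "Consultas de Medicina Familiar": 0,
--         "Consultas de M.F. fin de semana": 0,
--         "Consultas Aten 1ra. Vez": 0,
--         "Consultas de M.F. Subsecuentes": 0,
--         "ESTOMATOLOGIA": 0,
--         "SALUD EN EL TRABAJO": 0,
--         "ATENCION MEDICA CONTINUA - URGENCIAS": 0,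
--         "CENTRO DE ATENCION A LA DIABETES EN EL IMSS (CADIMSS)": 0,
--         "PLANIFICACION FAMILIAR": 0,
--         "NUTRICION Y DIETETICA": 0,
--         "TRABAJO SOCIAL": 0,
--         "MEDICINA PREVENTIVA": 0,
--         "ENFERMERA ESPECIALISTA EN MEDICINA FAMILIAR": 0,
--     }
--
--     for periodo_data in datos_historicos["periodos"].values():
--         if "resumen_periodo" in periodo_data:
--             for categoria, valor in periodo_data["resumen_periodo"].items():
--                 if categoria in resumen:
--                     resumen[categoria] += valor
--
--     return resumen
-- ===== SOURCE B (Python) =====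
-- CATEGORIAS = [
--     "Total de Consultas de la Unidad",
--     "Consultas de Medicina Familiar",
--     "Consultas de M.F. fin de semana",
--     "Consultas Aten 1ra. Vez",
--     "Consultas de M.F. Subsecuentes",
--     "ESTOMATOLOGIA",
--     "SALUD EN EL TRABAJO",
--     "ATENCION MEDICA CONTINUA - URGENCIAS",
--     "CENTRO DE ATENCION A LA DIABETES EN EL IMSS (CADIMSS)",
--     "PLANIFICACION FAMILIAR",
--     "NUTRICION Y DIETETICA",
--     "TRABAJO SOCIAL",
--     "MEDICINA PREVENTIVA",
--     "ENFERMERA ESPECIALISTA EN MEDICINA FAMILIAR",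
-- ]
--
--
-- def recalcular_resumen_anual(datos_historicos):
--     """Recalcula el resumen anual basado en todos los periodos"""
--     periodos = list(datos_historicos["periodos"].values())
--     return {
--         cat: sum(
--             p["resumen_periodo"].get(cat, 0)
--             for p in periodos
--             if "resumen_periodo" in p
--         )
--         for cat in CATEGORIAS
--     }
-- ===== Notes on version B (the rewrite author's own statement) =====
-- stated objective: alternative
-- what changed: Inverted the traversal: instead of A's single period-outer pass that mutates an accumulator dict entry by entry, B builds the result with a category-outer dict comprehension, summing each of the 14 fixed categories across all periods independently.
import Mathlib
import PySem

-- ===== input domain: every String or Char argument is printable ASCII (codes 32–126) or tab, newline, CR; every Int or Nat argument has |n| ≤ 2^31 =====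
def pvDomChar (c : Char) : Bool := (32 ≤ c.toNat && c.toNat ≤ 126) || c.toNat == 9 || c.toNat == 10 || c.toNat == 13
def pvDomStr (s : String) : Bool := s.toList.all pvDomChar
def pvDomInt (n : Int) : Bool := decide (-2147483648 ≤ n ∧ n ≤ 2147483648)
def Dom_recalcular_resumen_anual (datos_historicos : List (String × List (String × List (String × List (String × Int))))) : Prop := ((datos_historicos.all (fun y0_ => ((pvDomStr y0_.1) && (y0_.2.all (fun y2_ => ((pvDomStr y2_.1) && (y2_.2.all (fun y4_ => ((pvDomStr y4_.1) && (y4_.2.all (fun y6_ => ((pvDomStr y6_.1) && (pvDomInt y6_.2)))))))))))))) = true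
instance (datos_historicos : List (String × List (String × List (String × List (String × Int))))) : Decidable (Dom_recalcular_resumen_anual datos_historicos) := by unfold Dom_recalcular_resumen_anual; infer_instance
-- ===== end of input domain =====

-- B inverts the traversal: a category-outer comprehension summing each fixed category across all
-- periods, instead of A's period-outer pass mutating an accumulator dict. Same result, similar cost.

-- ===== PORT A =====
def recalcular_resumen_anual (datos_historicos : List (String × List (String × List (String × List (String × Int))))) : List (String × Int) :=
  -- resumen = { 14 fixed categories ↦ 0 }
  let resumen : PySem.Dict String Int := PySem.Dict.mk
    [("Total de Consultas de la Unidad", 0),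
     ("Consultas de Medicina Familiar", 0),
     ("Consultas de M.F. fin de semana", 0),
     ("Consultas Aten 1ra. Vez", 0),
     ("Consultas de M.F. Subsecuentes", 0),
     ("ESTOMATOLOGIA", 0),
     ("SALUD EN EL TRABAJO", 0),
     ("ATENCION MEDICA CONTINUA - URGENCIAS", 0),
     ("CENTRO DE ATENCION A LA DIABETES EN EL IMSS (CADIMSS)", 0),
     ("PLANIFICACION FAMILIAR", 0),
     ("NUTRICION Y DIETETICA", 0),
     ("TRABAJO SOCIAL", 0),
     ("MEDICINA PREVENTIVA", 0),
     ("ENFERMERA ESPECIALISTA EN MEDICINA FAMILIAR", 0)]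
  -- datos_historicos["periodos"] (KeyError excluded by Pre_; [] is never used inside Pre_)
  let periodos := ((PySem.Dict.mk datos_historicos).get? "periodos").getD []
  -- for periodo_data in … .values(): if "resumen_periodo" in periodo_data: for categoria, valor in … .items(): if categoria in resumen: resumen[categoria] += valor
  let final := (PySem.Dict.values (PySem.Dict.mk periodos)).foldl (fun res pd =>
    if PySem.Dict.contains (PySem.Dict.mk pd) "resumen_periodo" then
      (PySem.Dict.items (PySem.Dict.mk (((PySem.Dict.mk pd).get? "resumen_periodo").getD []))).foldl
        (fun r (cv : String × Int) =>
          if PySem.Dict.contains r cv.1 then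
            PySem.Dict.insert r cv.1 (PySem.Dict.getD r cv.1 0 + cv.2)
          else r) res
    else res) resumen
  final.items

-- ===== PORT B =====
-- CATEGORIAS (module-level constant of Source B)
def pvCategorias : List String :=
  ["Total de Consultas de la Unidad",
   "Consultas de Medicina Familiar",
   "Consultas de M.F. fin de semana",
   "Consultas Aten 1ra. Vez",
   "Consultas de M.F. Subsecuentes",
   "ESTOMATOLOGIA",
   "SALUD EN EL TRABAJO",
   "ATENCION MEDICA CONTINUA - URGENCIAS",
   "CENTRO DE ATENCION A LA DIABETES EN EL IMSS (CADIMSS)",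
   "PLANIFICACION FAMILIAR",
   "NUTRICION Y DIETETICA",
   "TRABAJO SOCIAL",
   "MEDICINA PREVENTIVA",
   "ENFERMERA ESPECIALISTA EN MEDICINA FAMILIAR"]

def recalcular_resumen_anual_alt (datos_historicos : List (String × List (String × List (String × List (String × Int))))) : List (String × Int) :=
  -- periodos = list(datos_historicos["periodos"].values())
  let periodos := PySem.Dict.values (PySem.Dict.mk (((PySem.Dict.mk datos_historicos).get? "periodos").getD []))
  -- {cat: sum(p["resumen_periodo"].get(cat, 0) for p in periodos if "resumen_periodo" in p) for cat in CATEGORIAS}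
  pvCategorias.map (fun cat =>
    (cat, periodos.foldl (fun s p =>
      if PySem.Dict.contains (PySem.Dict.mk p) "resumen_periodo" then
        s + PySem.Dict.getD (PySem.Dict.mk (((PySem.Dict.mk p).get? "resumen_periodo").getD [])) cat 0
      else s) 0))

-- ===== PRECONDITION & SPEC =====
-- Pre_ excludes (a) inputs missing the "periodos" key, on which A raises KeyError, and (b) association
-- lists whose inner "resumen_periodo" value carries duplicate category keys — such inputs do not
-- correspond to any Python dict (Python dicts cannot hold duplicate keys), so A never sees them.
def Pre_recalcular_resumen_anual (datos_historicos : List (String × List (String × List (String × List (String × Int))))) : Prop :=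
  "periodos" ∈ datos_historicos.map Prod.fst ∧
  ∀ p ∈ datos_historicos, ∀ pd ∈ p.2, ∀ e ∈ pd.2,
    e.1 = "resumen_periodo" → (e.2.map Prod.fst).Nodup

instance (datos_historicos : List (String × List (String × List (String × List (String × Int))))) : Decidable (Pre_recalcular_resumen_anual datos_historicos) := by
  unfold Pre_recalcular_resumen_anual; infer_instance

def pvWitness_recalcular_resumen_anual : (List (String × List (String × List (String × List (String × Int))))) :=
  [("periodos", [("2024-01", [("resumen_periodo", [("TRABAJO SOCIAL", 3), ("ESTOMATOLOGIA", 2)])]),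
                 ("2024-02", [("otro", [])])])]

def Spec_recalcular_resumen_anual (datos_historicos : List (String × List (String × List (String × List (String × Int))))) (out : List (String × Int)) : Prop := out = recalcular_resumen_anual_alt datos_historicos
instance (datos_historicos : List (String × List (String × List (String × List (String × Int))))) (out : List (String × Int)) : Decidable (Spec_recalcular_resumen_anual datos_historicos out) := by unfold Spec_recalcular_resumen_anual; infer_instance

-- ===== CLAIM (what is proved, stated in full; the proofs are below) =====
def Claim_equal_recalcular_resumen_anual : Prop := ∀ (datos_historicos : List (String × List (String × List (String × List (String × Int))))), Dom_recalcular_resumen_anual datos_historicos → Pre_recalcular_resumen_anual datos_historicos → Spec_recalcular_resumen_anual datos_historicos (recalcular_resumen_anual datos_historicos)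

-- ===== LEMMAS AND PROOFS =====

def pvContrib (c : String) : List (String × Int) → Int
  | [] => 0
  | (k, v) :: t => (if k = c then v else 0) + pvContrib c t

lemma pvContrib_of_not_mem (c : String) (l : List (String × Int)) (h : c ∉ l.map Prod.fst) :
    pvContrib c l = 0 := by
  induction l with
  | nil => rfl
  | cons kv t ih =>
    obtain ⟨k, v⟩ := kv
    simp only [List.map_cons, List.mem_cons, not_or] at h
    simp [pvContrib, Ne.symm h.1, ih h.2]

lemma pvContrib_eq_getD (c : String) (l : List (String × Int)) (h : (l.map Prod.fst).Nodup) :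
    pvContrib c l = PySem.Dict.getD (PySem.Dict.mk l) c 0 := by
  induction l with
  | nil =>
    show (0 : Int) = PySem.Dict.getD PySem.Dict.empty c 0
    simp [PySem.Dict.getD_empty]
  | cons kv t ih =>
    obtain ⟨k, v⟩ := kv
    simp only [List.map_cons, List.nodup_cons] at h
    rw [pvContrib, PySem.Dict.getD_eq_get?_getD, PySem.Dict.get?_mk_cons]
    by_cases hk : k = c
    · subst hk
      simp [pvContrib_of_not_mem k t h.1]
    · have : (k == c) = false := by simpa using hk
      simp [hk, this, ih h.2, PySem.Dict.getD_eq_get?_getD]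

lemma pvStep_map (cats : List String) (hnd : cats.Nodup) (f : String → Int) (k : String) (v : Int) :
    (if PySem.Dict.contains (PySem.Dict.mk (cats.map fun c => (c, f c))) k
     then PySem.Dict.insert (PySem.Dict.mk (cats.map fun c => (c, f c))) k
            (PySem.Dict.getD (PySem.Dict.mk (cats.map fun c => (c, f c))) k 0 + v)
     else PySem.Dict.mk (cats.map fun c => (c, f c)))
    = PySem.Dict.mk (cats.map fun c => (c, f c + if k = c then v else 0)) := by
  have hkeys : (PySem.Dict.mk (cats.map fun c => (c, f c))).keys = cats := by
    rw [PySem.Dict.keys_mk, List.map_map]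
    have h2 : ((fun (x : String × Int) => x.1) ∘ fun c => (c, f c)) = id := rfl
    rw [h2, List.map_id]
  by_cases hk : k ∈ cats
  · have hc : (PySem.Dict.mk (cats.map fun c => (c, f c))).contains k = true := by
      rw [PySem.Dict.contains_eq_decide_mem_keys, hkeys]; simpa using hk
    have hgd : PySem.Dict.getD (PySem.Dict.mk (cats.map fun c => (c, f c))) k 0 = f k := by
      apply PySem.Dict.getD_of_mem_items
      · exact List.mem_map.2 ⟨k, hk, rfl⟩
      · rw [hkeys]; exact hnd
    rw [if_pos hc, hgd]
    apply PySem.Dict.ext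
    rw [PySem.Dict.items_insert_of_contains (h := hc)]
    show (cats.map fun c => (c, f c)).map _ = _
    rw [List.map_map]
    apply List.map_congr_left
    intro c hcmem
    by_cases hck : c = k
    · subst hck; simp
    · have : (c == k) = false := by simpa using hck
      show (if (c == k) = true then (k, f k + v) else (c, f c)) = _
      rw [if_neg (by simp [this] : ¬ (c == k) = true),
          if_neg (fun h : k = c => hck (Eq.symm h)), add_zero]
  · have hc : (PySem.Dict.mk (cats.map fun c => (c, f c))).contains k = false := by
      rw [PySem.Dict.contains_eq_decide_mem_keys, hkeys]; simpa using hk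
    rw [if_neg (by simp [hc])]
    apply PySem.Dict.ext
    show (cats.map fun c => (c, f c)) = _
    apply List.map_congr_left
    intro c hcmem
    have : ¬ k = c := fun h => hk (h ▸ hcmem)
    simp [this]

lemma pvFold_items (cats : List String) (hnd : cats.Nodup) (l : List (String × Int)) (f : String → Int) :
    l.foldl (fun r (cv : String × Int) =>
        if PySem.Dict.contains r cv.1 then
          PySem.Dict.insert r cv.1 (PySem.Dict.getD r cv.1 0 + cv.2)
        else r) (PySem.Dict.mk (cats.map fun c => (c, f c)))
    = PySem.Dict.mk (cats.map fun c => (c, f c + pvContrib c l)) := by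
  induction l generalizing f with
  | nil =>
    simp only [List.foldl_nil]
    congr 1
    exact List.map_congr_left fun c _ => by simp [pvContrib]
  | cons kv t ih =>
    obtain ⟨k, v⟩ := kv
    rw [List.foldl_cons]
    rw [show (if PySem.Dict.contains (PySem.Dict.mk (cats.map fun c => (c, f c))) (k, v).1
        then PySem.Dict.insert (PySem.Dict.mk (cats.map fun c => (c, f c))) (k, v).1
               (PySem.Dict.getD (PySem.Dict.mk (cats.map fun c => (c, f c))) (k, v).1 0 + (k, v).2)
        else PySem.Dict.mk (cats.map fun c => (c, f c)))
        = PySem.Dict.mk (cats.map fun c => (c, (fun c => f c + if k = c then v else 0) c))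
      from pvStep_map cats hnd f k v]
    rw [ih (fun c => f c + if k = c then v else 0)]
    congr 1
    exact List.map_congr_left fun c _ => by simp [pvContrib, add_assoc]

lemma pvFoldB_shift (cat : String) (ps : List (List (String × List (String × Int)))) (s : Int) :
    ps.foldl (fun s p =>
      if PySem.Dict.contains (PySem.Dict.mk p) "resumen_periodo" then
        s + PySem.Dict.getD (PySem.Dict.mk (((PySem.Dict.mk p).get? "resumen_periodo").getD [])) cat 0
      else s) s
    = s + ps.foldl (fun s p =>
      if PySem.Dict.contains (PySem.Dict.mk p) "resumen_periodo" then
        s + PySem.Dict.getD (PySem.Dict.mk (((PySem.Dict.mk p).get? "resumen_periodo").getD [])) cat 0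
      else s) 0 := by
  induction ps generalizing s with
  | nil => simp
  | cons p t ih =>
    simp only [List.foldl_cons]
    rw [ih, @ih (if PySem.Dict.contains (PySem.Dict.mk p) "resumen_periodo" then
        0 + PySem.Dict.getD (PySem.Dict.mk (((PySem.Dict.mk p).get? "resumen_periodo").getD [])) cat 0
      else 0)]
    by_cases h : PySem.Dict.contains (PySem.Dict.mk p) "resumen_periodo" = true
    · simp [h]; ring
    · simp [h]

lemma pvFold_periods (cats : List String) (hnd : cats.Nodup)
    (ps : List (List (String × List (String × Int)))) (f : String → Int)
    (hps : ∀ pd ∈ ps, ∀ e ∈ pd, e.1 = "resumen_periodo" → (e.2.map Prod.fst).Nodup) :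
    ps.foldl (fun res pd =>
      if PySem.Dict.contains (PySem.Dict.mk pd) "resumen_periodo" then
        (PySem.Dict.items (PySem.Dict.mk (((PySem.Dict.mk pd).get? "resumen_periodo").getD []))).foldl
          (fun r (cv : String × Int) =>
            if PySem.Dict.contains r cv.1 then
              PySem.Dict.insert r cv.1 (PySem.Dict.getD r cv.1 0 + cv.2)
            else r) res
      else res) (PySem.Dict.mk (cats.map fun c => (c, f c)))
    = PySem.Dict.mk (cats.map fun c => (c, f c + ps.foldl (fun s p =>
        if PySem.Dict.contains (PySem.Dict.mk p) "resumen_periodo" then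
          s + PySem.Dict.getD (PySem.Dict.mk (((PySem.Dict.mk p).get? "resumen_periodo").getD [])) c 0
        else s) 0)) := by
  induction ps generalizing f with
  | nil =>
    simp only [List.foldl_nil]
    congr 1
    exact List.map_congr_left fun c _ => by simp
  | cons pd t ih =>
    have hps' : ∀ x ∈ t, ∀ e ∈ x, e.1 = "resumen_periodo" → (e.2.map Prod.fst).Nodup :=
      fun x hx => hps x (List.mem_cons_of_mem _ hx)
    simp only [List.foldl_cons]
    by_cases h : PySem.Dict.contains (PySem.Dict.mk pd) "resumen_periodo" = true
    · obtain ⟨itms, hit⟩ : ∃ i, (PySem.Dict.mk pd).get? "resumen_periodo" = some i := by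
        have := PySem.Dict.contains_eq_isSome_get? (PySem.Dict.mk pd) "resumen_periodo"
        rw [h] at this
        exact Option.isSome_iff_exists.mp this.symm
      have hmem : ("resumen_periodo", itms) ∈ pd :=
        PySem.Dict.mem_items_of_get?_eq_some _ hit
      have hitnd : (itms.map Prod.fst).Nodup :=
        hps pd (List.mem_cons_self) _ hmem rfl
      rw [if_pos h, hit]
      have hg : ((some itms).getD [] : List (String × Int)) = itms := rfl
      rw [hg, pvFold_items cats hnd itms f,
          ih (fun c => f c + pvContrib c itms) hps']
      congr 1
      apply List.map_congr_left
      intro c _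
      rw [if_pos h, pvContrib_eq_getD c itms hitnd,
          pvFoldB_shift c t (0 + PySem.Dict.getD (PySem.Dict.mk itms) c 0), zero_add, add_assoc]
    · rw [if_neg h, ih f hps']
      congr 1
      apply List.map_congr_left
      intro c _
      rw [if_neg h]

-- ===== VERDICT (by name: the statement is the Claim_ definition above) =====
theorem recalcular_resumen_anual_spec : Claim_equal_recalcular_resumen_anual := by
  intro dh _ hpre
  obtain ⟨hkey, hnodup⟩ := hpre
  have hcont : (PySem.Dict.mk dh).contains "periodos" = true := by
    rw [PySem.Dict.contains_eq_decide_mem_keys, PySem.Dict.keys_mk]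
    simpa using hkey
  obtain ⟨pds, hpds⟩ : ∃ x, (PySem.Dict.mk dh).get? "periodos" = some x := by
    have := PySem.Dict.contains_eq_isSome_get? (PySem.Dict.mk dh) "periodos"
    rw [hcont] at this
    exact Option.isSome_iff_exists.mp this.symm
  have hpdsmem : ("periodos", pds) ∈ dh := PySem.Dict.mem_items_of_get?_eq_some _ hpds
  have hps : ∀ pd ∈ PySem.Dict.values (PySem.Dict.mk pds), ∀ e ∈ pd,
      e.1 = "resumen_periodo" → (e.2.map Prod.fst).Nodup := by
    intro pd hpd e he h1
    obtain ⟨q, hq, hq2⟩ := List.mem_map.mp hpd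
    exact hnodup _ hpdsmem q hq e (hq2 ▸ he) h1
  unfold Spec_recalcular_resumen_anual recalcular_resumen_anual recalcular_resumen_anual_alt
  simp only [hpds]
  have hg : ((some pds).getD [] : List (String × List (String × List (String × Int)))) = pds := rfl
  rw [hg]
  have h0 : (PySem.Dict.mk
    [("Total de Consultas de la Unidad", (0:Int)),
     ("Consultas de Medicina Familiar", 0),
     ("Consultas de M.F. fin de semana", 0),
     ("Consultas Aten 1ra. Vez", 0),
     ("Consultas de M.F. Subsecuentes", 0),
     ("ESTOMATOLOGIA", 0),
     ("SALUD EN EL TRABAJO", 0),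
     ("ATENCION MEDICA CONTINUA - URGENCIAS", 0),
     ("CENTRO DE ATENCION A LA DIABETES EN EL IMSS (CADIMSS)", 0),
     ("PLANIFICACION FAMILIAR", 0),
     ("NUTRICION Y DIETETICA", 0),
     ("TRABAJO SOCIAL", 0),
     ("MEDICINA PREVENTIVA", 0),
     ("ENFERMERA ESPECIALISTA EN MEDICINA FAMILIAR", 0)])
    = PySem.Dict.mk (pvCategorias.map fun c => (c, (0:Int))) := rfl
  rw [h0, pvFold_periods pvCategorias (by decide) (PySem.Dict.values (PySem.Dict.mk pds)) (fun _ => 0) hps]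
  have hitems : ∀ (L : List (String × Int)), (PySem.Dict.mk L).items = L := fun _ => rfl
  rw [hitems]
  apply List.map_congr_left
  intro c _
  rw [zero_add]
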